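-- pv_equiv track=rewrite | github.com/mmchenry/conference_planner | make_sessions.py | is_divisible_by_combinations
-- ===== SOURCE A (Python) =====
-- def is_divisible_by_combinations(number, current_sum=0, max_sum=None):
--     """
--     Determines whether a number is divisible by the sum of any combination of 6, 7, and 8.
--
--     Parameters:
--     - number (int): The number to check.
--     - current_sum (int): The current sum of the digits.
--     - max_sum (int): The maximum sum of the digits.
--
--     Returns:
--     - bool: Whether the number is divisible by the sum of any combination of 6, 7, and 8.
--     """
--
--     digits=[6, 7, 8]
--
--     if max_sum is None:
--         max_sum = number
--
--     # Base case: if current_sum exceeds max_sum, stop the recursion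
--     if current_sum > max_sum:
--         return False
--
--     # Check if the current sum divides the number
--     if current_sum != 0 and number % current_sum == 0:
--         return True
--
--     # Recursive case: try adding each digit to the current sum and recurse
--     for digit in digits:
--         if is_divisible_by_combinations(number, current_sum + digit, max_sum):
--             return True
--
--     return False
-- ===== SOURCE B (Python) =====
-- def is_divisible_by_combinations(number, current_sum=0, max_sum=None):
--     """Same result as A: is `number` divisible by current_sum plus some sum of 6s, 7s and 8s
--     (the candidate sum capped at max_sum, which defaults to number)?
--
--     Instead of the triple-branching recursion, use the closed-form membership test for the
--     numerical semigroup generated by {6, 7, 8} (k is a sum of 6s/7s/8s iff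
--     k == 0, 6 <= k <= 8, 12 <= k <= 16, or k >= 18) and scan the candidate offsets once.
--     """
--     msum = number if max_sum is None else max_sum
--     for k in range(msum - current_sum + 1):
--         if k == 0 or 6 <= k <= 8 or 12 <= k <= 16 or k >= 18:
--             s = current_sum + k
--             if s != 0 and number % s == 0:
--                 return True
--     return False
-- ===== Notes on version B (the rewrite author's own statement) =====
-- stated objective: alternative
-- what changed: Replaced the exponential triple-branching recursion over partial sums with a single linear scan of candidate offsets using the closed-form membership test for the numerical semigroup generated by {6,7,8} (k representable iff k=0, 6<=k<=8, 12<=k<=16 or k>=18).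
-- outside the precondition, e.g. on is_divisible_by_combinations(5407, 7, None): A returns True, B returns True
import Mathlib
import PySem

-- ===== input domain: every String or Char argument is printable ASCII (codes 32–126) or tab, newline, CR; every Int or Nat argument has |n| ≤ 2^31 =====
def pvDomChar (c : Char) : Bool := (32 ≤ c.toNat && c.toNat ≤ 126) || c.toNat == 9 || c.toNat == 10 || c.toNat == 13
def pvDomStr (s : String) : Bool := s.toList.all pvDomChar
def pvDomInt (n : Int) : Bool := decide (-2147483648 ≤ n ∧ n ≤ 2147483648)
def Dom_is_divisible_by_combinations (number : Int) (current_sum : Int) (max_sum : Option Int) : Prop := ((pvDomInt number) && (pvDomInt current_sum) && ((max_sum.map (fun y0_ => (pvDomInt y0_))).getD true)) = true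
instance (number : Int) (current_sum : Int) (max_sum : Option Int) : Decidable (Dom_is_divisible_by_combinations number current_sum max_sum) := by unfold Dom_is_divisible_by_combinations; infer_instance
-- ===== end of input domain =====

-- B replaces A's triple-branching recursion by one linear scan of candidate offsets using
-- the closed-form membership test for the numerical semigroup ⟨6,7,8⟩ (objective: alternative).

-- ===== PORT A =====
-- the recursion of A, after the `max_sum is None` default has been resolved to `msum`
def pvGoA (number msum current_sum : Int) : Bool :=
  if current_sum > msum then false
  else if current_sum ≠ 0 ∧ PySem.Int.mod number current_sum = 0 then true
  else if pvGoA number msum (current_sum + 6) then true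
  else if pvGoA number msum (current_sum + 7) then true
  else if pvGoA number msum (current_sum + 8) then true
  else false
termination_by (msum + 1 - current_sum).toNat
decreasing_by all_goals simp_all <;> omega

def is_divisible_by_combinations (number : Int) (current_sum : Int) (max_sum : Option Int) : Bool :=
  let msum := max_sum.getD number
  pvGoA number msum current_sum

-- ===== PORT B =====
def is_divisible_by_combinations_alt (number : Int) (current_sum : Int) (max_sum : Option Int) : Bool :=
  let msum := max_sum.getD number
  (PySem.List.pyRange 0 (msum - current_sum + 1) 1).any (fun k =>
    (k == 0 || (6 ≤ k && k ≤ 8) || (12 ≤ k && k ≤ 16) || 18 ≤ k) &&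
    (current_sum + k != 0 && PySem.Int.mod number (current_sum + k) == 0))

-- ===== PRECONDITION & SPEC =====
-- Pre_ excludes the inputs on which A cannot feasibly be evaluated or raises: those whose search
-- span max_sum - current_sum (max_sum defaulting to number) exceeds 5000 AND whose leftmost
-- descent chain current_sum + 6k (k ≤ 800) contains no nonzero divisor of number — there A
-- either raises RecursionError (the descent exceeds Python's recursion limit) or must explore
-- an exponentially large search tree; A = B holds on all of Pre_ (and the proof below never
-- uses Pre_, so no returning corner is being hidden by it).
def Pre_is_divisible_by_combinations (number : Int) (current_sum : Int) (max_sum : Option Int) : Prop :=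
  max_sum.getD number - current_sum ≤ 5000 ∨
    ∃ k ∈ List.range 801, current_sum + 6 * (k : Int) ≠ 0 ∧ (current_sum + 6 * (k : Int)) ∣ number
instance (number : Int) (current_sum : Int) (max_sum : Option Int) : Decidable (Pre_is_divisible_by_combinations number current_sum max_sum) := by unfold Pre_is_divisible_by_combinations; infer_instance
def pvWitness_is_divisible_by_combinations : Int × Int × Option Int := (84, 0, none)

def Spec_is_divisible_by_combinations (number : Int) (current_sum : Int) (max_sum : Option Int) (out : Bool) : Prop := out = is_divisible_by_combinations_alt number current_sum max_sum
instance (number : Int) (current_sum : Int) (max_sum : Option Int) (out : Bool) : Decidable (Spec_is_divisible_by_combinations number current_sum max_sum out) := by unfold Spec_is_divisible_by_combinations; infer_instance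

-- ===== CLAIM (what is proved, stated in full; the proofs are below) =====
def Claim_equal_is_divisible_by_combinations : Prop := ∀ (number : Int) (current_sum : Int) (max_sum : Option Int), Dom_is_divisible_by_combinations number current_sum max_sum → Pre_is_divisible_by_combinations number current_sum max_sum → Spec_is_divisible_by_combinations number current_sum max_sum (is_divisible_by_combinations number current_sum max_sum)


-- ===== LEMMAS AND PROOFS =====

-- k lies in the numerical semigroup generated by {6,7,8} (closed form)
def pvRep (k : Int) : Prop := k = 0 ∨ (6 ≤ k ∧ k ≤ 8) ∨ (12 ≤ k ∧ k ≤ 16) ∨ 18 ≤ k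

-- common characterisation of both programs' result
def pvSpec (number msum cs : Int) : Prop :=
  ∃ k : Int, 0 ≤ k ∧ pvRep k ∧ cs + k ≤ msum ∧ cs + k ≠ 0 ∧ (cs + k) ∣ number

lemma pvRep_step (k : Int) (hk : pvRep k) (h0 : k ≠ 0) :
    (6 ≤ k ∧ pvRep (k - 6)) ∨ (7 ≤ k ∧ pvRep (k - 7)) ∨ (8 ≤ k ∧ pvRep (k - 8)) := by
  unfold pvRep at *; omega

lemma pvRep_add (k d : Int) (hk : pvRep k) (hd : d = 6 ∨ d = 7 ∨ d = 8) : pvRep (k + d) := by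
  unfold pvRep at *; omega

lemma pvSpec_up (number msum cs d : Int) (hd : d = 6 ∨ d = 7 ∨ d = 8)
    (h : pvSpec number msum (cs + d)) : pvSpec number msum cs := by
  obtain ⟨k, hk0, hrep, hle, hne, hdvd⟩ := h
  refine ⟨k + d, by omega, pvRep_add k d hrep hd, by omega, by omega, ?_⟩
  have : cs + (k + d) = cs + d + k := by ring
  rw [this]; exact hdvd

lemma pvSpec_down (number msum cs : Int) (h : pvSpec number msum cs)
    (hdiv : ¬(cs ≠ 0 ∧ cs ∣ number)) :
    pvSpec number msum (cs + 6) ∨ pvSpec number msum (cs + 7) ∨ pvSpec number msum (cs + 8) := by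
  obtain ⟨k, hk0, hrep, hle, hne, hdvd⟩ := h
  by_cases hk : k = 0
  · exact absurd ⟨by omega, by simpa [hk] using hdvd⟩ hdiv
  · rcases pvRep_step k hrep hk with ⟨h6, r6⟩ | ⟨h7, r7⟩ | ⟨h8, r8⟩
    · exact Or.inl ⟨k - 6, by omega, r6, by omega, by omega, by rwa [show cs + 6 + (k - 6) = cs + k by ring]⟩
    · exact Or.inr (Or.inl ⟨k - 7, by omega, r7, by omega, by omega, by rwa [show cs + 7 + (k - 7) = cs + k by ring]⟩)
    · exact Or.inr (Or.inr ⟨k - 8, by omega, r8, by omega, by omega, by rwa [show cs + 8 + (k - 8) = cs + k by ring]⟩)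

lemma pvGoA_iff (number msum cs : Int) : pvGoA number msum cs = true ↔ pvSpec number msum cs := by
  fun_induction pvGoA number msum cs with
  | case1 cs h =>
    simp only [Bool.false_eq_true, false_iff]
    rintro ⟨k, hk0, _, hle, _, _⟩; omega
  | case2 cs h hdiv =>
    simp only [true_iff]
    exact ⟨0, le_refl 0, Or.inl rfl, by omega, by simpa using hdiv.1,
      by simpa using (PySem.Int.mod_eq_zero_iff_dvd number cs).mp hdiv.2⟩
  | case3 cs h hdiv ht ih6 =>
    simp only [true_iff]
    exact pvSpec_up number msum cs 6 (Or.inl rfl) (ih6.mp ht)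
  | case4 cs h hdiv h6 ht ih6 ih7 =>
    simp only [true_iff]
    exact pvSpec_up number msum cs 7 (Or.inr (Or.inl rfl)) (ih7.mp ht)
  | case5 cs h hdiv h6 h7 ht ih6 ih7 ih8 =>
    simp only [true_iff]
    exact pvSpec_up number msum cs 8 (Or.inr (Or.inr rfl)) (ih8.mp ht)
  | case6 cs h hdiv h6 h7 h8 ih6 ih7 ih8 =>
    simp only [Bool.false_eq_true, false_iff]
    intro hs
    have hdiv' : ¬(cs ≠ 0 ∧ cs ∣ number) := by
      intro ⟨h1, h2⟩
      exact hdiv ⟨h1, (PySem.Int.mod_eq_zero_iff_dvd number cs).mpr h2⟩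
    rcases pvSpec_down number msum cs hs hdiv' with hx | hx | hx
    · exact h6 (ih6.mpr hx)
    · exact h7 (ih7.mpr hx)
    · exact h8 (ih8.mpr hx)

lemma pvAlt_iff (number msum cs : Int) :
    ((PySem.List.pyRange 0 (msum - cs + 1) 1).any (fun k =>
      (k == 0 || (6 ≤ k && k ≤ 8) || (12 ≤ k && k ≤ 16) || 18 ≤ k) &&
      (cs + k != 0 && PySem.Int.mod number (cs + k) == 0))) = true ↔ pvSpec number msum cs := by
  simp only [List.any_eq_true, PySem.List.mem_pyRange_one, Bool.and_eq_true, Bool.or_eq_true,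
    beq_iff_eq, bne_iff_ne, decide_eq_true_eq, pvSpec, pvRep,
    PySem.Int.mod_eq_zero_iff_dvd]
  constructor
  · rintro ⟨k, ⟨hk0, hklt⟩, hrep, hne, hdvd⟩
    exact ⟨k, hk0, by tauto, by omega, hne, hdvd⟩
  · rintro ⟨k, hk0, hrep, hle, hne, hdvd⟩
    exact ⟨k, ⟨hk0, by omega⟩, by tauto, hne, hdvd⟩

-- ===== VERDICT (by name: the statement is the Claim_ definition above) =====
theorem is_divisible_by_combinations_spec : Claim_equal_is_divisible_by_combinations := by
  intro number current_sum max_sum _ _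
  unfold Spec_is_divisible_by_combinations is_divisible_by_combinations is_divisible_by_combinations_alt
  exact Bool.eq_iff_iff.mpr
    ((pvGoA_iff number (max_sum.getD number) current_sum).trans
      (pvAlt_iff number (max_sum.getD number) current_sum).symm)
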